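-- pv_equiv track=rewrite | github.com/dgsim126/Algo_Study_2 | Programmers/김선엽/2504/250429/반복문자 지우기.py | solution
-- ===== SOURCE A (Python) =====
-- from collections import deque
--
-- def solution(string):
--     queue = deque([])
--     string = deque(string)
--     while string:
--         str_ = string.popleft()
--         if queue and queue[-1] == str_:
--             queue.pop()
--             continue
--         else:
--             queue.append(str_)
--
--     return len(queue)
-- ===== SOURCE B (Python) =====
-- def merge(L, R):
--     while L and R and L[-1] == R[0]:
--         L = L[:-1]
--         R = R[1:]
--     return L + R
--
-- def solve(s):
--     if len(s) <= 1:
--         return s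
--     m = len(s) // 2
--     return merge(solve(s[:m]), solve(s[m:]))
--
-- def solution(string):
--     return len(solve(list(string)))
-- ===== Notes on version B (the rewrite author's own statement) =====
-- stated objective: alternative
-- what changed: Replaces A's single left-to-right stack (deque) pass by divide and conquer: reduce each half recursively and cancel equal characters across the boundary, correct by confluence of adjacent-pair deletion.
import Mathlib
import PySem

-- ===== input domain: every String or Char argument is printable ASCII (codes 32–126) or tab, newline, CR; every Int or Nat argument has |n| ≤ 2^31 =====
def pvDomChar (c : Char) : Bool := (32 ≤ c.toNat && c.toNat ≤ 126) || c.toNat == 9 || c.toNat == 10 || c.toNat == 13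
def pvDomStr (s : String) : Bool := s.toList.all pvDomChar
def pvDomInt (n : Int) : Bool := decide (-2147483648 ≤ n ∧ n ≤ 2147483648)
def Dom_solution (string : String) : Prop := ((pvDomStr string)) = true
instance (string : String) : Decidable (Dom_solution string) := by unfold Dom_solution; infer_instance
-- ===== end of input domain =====

-- B replaces A's single left-to-right stack (deque) pass by divide and conquer:
-- reduce each half recursively, then cancel equal characters across the boundary
-- (correct by confluence of adjacent-pair deletion); same return value.

-- ===== PORT A =====
-- A's while loop: pop chars from the front of the input, maintain `queue` (append at
-- the end, compare/pop at the end), return its final length.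
def solutionGo (queue : List Char) (string : List Char) : Int :=
  match string with
  | [] => (queue.length : Int)
  | c :: rest =>
    if !queue.isEmpty && queue.getLast? == some c then
      solutionGo queue.dropLast rest
    else
      solutionGo (queue ++ [c]) rest

def solution (string : String) : Int := solutionGo [] string.toList

-- ===== PORT B =====
-- B's merge: while L and R and L[-1] == R[0]: L = L[:-1]; R = R[1:]; return L + R
def bMerge (L R : List Char) : List Char :=
  if L ≠ [] ∧ R ≠ [] ∧ L.getLast? = R.head? then
    bMerge L.dropLast R.tail
  else L ++ R
termination_by R.length
decreasing_by
  rename_i h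
  match R, h.2.1 with
  | _ :: R', _ => simp

-- B's solve: split in half, recurse, merge.
def bSolve (s : List Char) : List Char :=
  if s.length ≤ 1 then s
  else
    bMerge (bSolve (s.take (s.length / 2))) (bSolve (s.drop (s.length / 2)))
termination_by s.length
decreasing_by
  · rename_i h; simp only [List.length_take]; omega
  · rename_i h; simp only [List.length_drop]; omega

def solution_alt (string : String) : Int := ((bSolve string.toList).length : Int)

-- ===== PRECONDITION & SPEC =====
def Spec_solution (string : String) (out : Int) : Prop := out = solution_alt string
instance (string : String) (out : Int) : Decidable (Spec_solution string out) := by unfold Spec_solution; infer_instance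

-- ===== CLAIM (what is proved, stated in full; the proofs are below) =====
def Claim_equal_solution : Prop := ∀ (string : String), Dom_solution string → Spec_solution string (solution string)

-- ===== LEMMAS AND PROOFS =====

-- The common abstraction: the stack transition (stack kept reversed: head = top).
def pvStep (st : List Char) (c : Char) : List Char :=
  match st with
  | d :: t => if d = c then t else c :: d :: t
  | [] => [c]

theorem pvStep_chain {st : List Char} {c : Char} (h : List.IsChain (· ≠ ·) st) :
    List.IsChain (· ≠ ·) (pvStep st c) := by
  match st with
  | [] => exact List.isChain_singleton c
  | d :: t =>
    simp only [pvStep]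
    split_ifs with hd
    · exact h.tail
    · exact List.isChain_cons_cons.mpr ⟨fun h' => hd h'.symm, h⟩

theorem pvStep_cancel {st : List Char} {c : Char} (h : List.IsChain (· ≠ ·) st) :
    pvStep (pvStep st c) c = st := by
  match st with
  | [] => simp [pvStep]
  | d :: t =>
    by_cases hd : d = c
    · subst hd
      match t with
      | [] => simp [pvStep]
      | e :: t' =>
        have hne : d ≠ e := (List.isChain_cons_cons.mp h).1
        have hed : e ≠ d := fun h' => hne h'.symm
        simp [pvStep, hed]
    · simp [pvStep, hd]

theorem pvFold_chain {st : List Char} (s : List Char) (h : List.IsChain (· ≠ ·) st) :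
    List.IsChain (· ≠ ·) (List.foldl pvStep st s) := by
  induction s generalizing st with
  | nil => exact h
  | cons c s ih => exact ih (pvStep_chain h)

theorem pvFold_pair (u : List Char) (c : Char) (v : List Char) {st : List Char}
    (h : List.IsChain (· ≠ ·) st) :
    List.foldl pvStep st (u ++ c :: c :: v) = List.foldl pvStep st (u ++ v) := by
  simp only [List.foldl_append, List.foldl_cons]
  rw [pvStep_cancel (pvFold_chain u h)]

-- Proof device: first adjacent equal pair, if any (not part of either port).
def findPair (s : List Char) : Option (List Char) :=
  match s with
  | a :: b :: rest => if a == b then some rest else (findPair (b :: rest)).map (a :: ·)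
  | _ => none

theorem findPair_length {s t : List Char} (h : findPair s = some t) :
    t.length < s.length := by
  induction s generalizing t with
  | nil => simp [findPair] at h
  | cons a s ih =>
    match s with
    | [] => simp [findPair] at h
    | b :: rest =>
      simp only [findPair] at h
      by_cases hab : a == b
      · simp [hab] at h; subst h; simp
      · simp [hab, Option.map_eq_some_iff] at h
        obtain ⟨u, hu, rfl⟩ := h
        have := ih hu
        simp only [List.length_cons] at this ⊢
        omega

-- findPair s = some t means t is s with one adjacent equal pair deleted.
theorem findPair_some {s t : List Char} (h : findPair s = some t) :
    ∃ u c v, s = u ++ c :: c :: v ∧ t = u ++ v := by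
  induction s generalizing t with
  | nil => simp [findPair] at h
  | cons a s ih =>
    match s with
    | [] => simp [findPair] at h
    | b :: rest =>
      simp only [findPair] at h
      by_cases hab : a == b
      · simp [hab] at h
        exact ⟨[], a, rest, by simp [(beq_iff_eq).mp hab], by simp [h]⟩
      · simp [hab, Option.map_eq_some_iff] at h
        obtain ⟨w, hw, rfl⟩ := h
        obtain ⟨u, c, v, h1, h2⟩ := ih hw
        exact ⟨a :: u, c, v, by simp [h1], by simp [h2]⟩

theorem findPair_none {s : List Char} (h : findPair s = none) :
    List.IsChain (· ≠ ·) s := by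
  induction s with
  | nil => exact List.isChain_nil
  | cons a s ih =>
    match s with
    | [] => exact List.isChain_singleton a
    | b :: rest =>
      simp only [findPair] at h
      by_cases hab : a == b
      · simp [hab] at h
      · simp [hab] at h
        exact List.isChain_cons_cons.mpr ⟨by simpa using hab, ih h⟩

-- On a pair-free input the stack just reverses the input on top of st.
theorem pvFold_nopair (s : List Char) (hs : List.IsChain (· ≠ ·) s) (st : List Char)
    (hts : ∀ c d, s.head? = some c → st.head? = some d → d ≠ c) :
    List.foldl pvStep st s = s.reverse ++ st := by
  induction s generalizing st with
  | nil => simp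
  | cons c s ih =>
    have hstep : pvStep st c = c :: st := by
      match st with
      | [] => rfl
      | d :: t =>
        have : d ≠ c := hts c d rfl rfl
        simp [pvStep, this]
    simp only [List.foldl_cons, hstep]
    rw [ih hs.tail (c :: st) ?_]
    · simp
    · intro e d he hd
      simp at hd; subst hd
      exact (List.isChain_cons.mp hs).1 e he

-- Feeding the reduction of v into a chain stack is the same as feeding v.
theorem pvFold_norm (n : Nat) : ∀ (v : List Char), v.length ≤ n → ∀ (st : List Char),
    List.IsChain (· ≠ ·) st →
    List.foldl pvStep st (List.foldl pvStep [] v).reverse = List.foldl pvStep st v := by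
  induction n with
  | zero =>
    intro v hv st _
    match v, hv with
    | [], _ => simp
  | succ n ih =>
    intro v hv st hst
    match hfp : findPair v with
    | none =>
      rw [pvFold_nopair v (findPair_none hfp) [] (by simp)]
      simp
    | some t =>
      obtain ⟨u, c, w, rfl, rfl⟩ := findPair_some hfp
      have hlen := findPair_length hfp
      rw [pvFold_pair u c w hst, pvFold_pair u c w (List.isChain_nil)]
      exact ih (u ++ w) (by omega) st hst

-- B's merge on chain inputs, computed through the stack (first argument reversed).
theorem bMerge_eq (R : List Char) : ∀ (l : List Char), List.IsChain (· ≠ ·) l →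
    List.IsChain (· ≠ ·) R →
    bMerge l.reverse R = (List.foldl pvStep l R).reverse := by
  induction R with
  | nil => intro l _ _; rw [bMerge]; simp
  | cons c R' ih =>
    intro l hl hR
    match l with
    | [] =>
      rw [bMerge]
      simp only [List.reverse_nil, ne_eq, not_true_eq_false, false_and, if_false]
      rw [pvFold_nopair (c :: R') hR [] (by simp)]
      simp
    | d :: l' =>
      by_cases hdc : d = c
      · subst hdc
        rw [bMerge]
        have hcond : (d :: l').reverse ≠ [] ∧ (d :: R' : List Char) ≠ [] ∧
            ((d :: l').reverse.getLast? = (d :: R').head?) := by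
          refine ⟨by simp, by simp, ?_⟩
          rw [List.getLast?_reverse]
          rfl
        rw [if_pos hcond]
        have hdl : (d :: l').reverse.dropLast = l'.reverse := by
          simp
        rw [hdl, List.tail_cons, ih l' hl.tail hR.tail]
        simp [pvStep]
      · rw [bMerge]
        have hcond : ¬ ((d :: l').reverse ≠ [] ∧ (c :: R' : List Char) ≠ [] ∧
            ((d :: l').reverse.getLast? = (c :: R').head?)) := by
          rw [List.getLast?_reverse]
          simp [hdc]
        rw [if_neg hcond]
        have hpush : List.foldl pvStep (d :: l') (c :: R') =
            List.foldl pvStep (c :: d :: l') R' := by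
          simp [pvStep, hdc]
        rw [hpush, pvFold_nopair R' hR.tail (c :: d :: l') ?_]
        · simp
        · intro e f he hf
          simp at hf; subst hf
          exact (List.isChain_cons.mp hR).1 e he

-- B's solve computes the reversed stack reduction.
theorem bSolve_eq (s : List Char) :
    bSolve s = (List.foldl pvStep [] s).reverse := by
  induction s using bSolve.induct with
  | case1 s h =>
    rw [bSolve, if_pos h]
    match s, h with
    | [], _ => rfl
    | [c], _ => simp [pvStep]
  | case2 s h ih1 ih2 =>
    rw [bSolve, if_neg h, ih1, ih2]
    have hchainR : List.IsChain (· ≠ ·)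
        (List.foldl pvStep [] (s.drop (s.length / 2))).reverse := by
      rw [List.isChain_reverse]
      have := pvFold_chain (st := []) (s.drop (s.length / 2)) List.isChain_nil
      exact this.imp (fun a b h' he => h' he.symm)
    rw [bMerge_eq _ _ (pvFold_chain _ List.isChain_nil) hchainR]
    rw [pvFold_norm (s.drop (s.length / 2)).length _ le_rfl _
      (pvFold_chain _ List.isChain_nil)]
    rw [← List.foldl_append, List.take_append_drop]

-- A's loop computes the stack length too (queue = reversed stack).
theorem solutionGo_eq (s : List Char) (r : List Char) :
    solutionGo r.reverse s = ((List.foldl pvStep r s).length : Int) := by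
  induction s generalizing r with
  | nil => simp [solutionGo]
  | cons c rest ih =>
    match r with
    | [] =>
      have := ih [c]
      simpa [solutionGo, pvStep] using this
    | d :: t =>
      simp only [solutionGo]
      by_cases hdc : d = c
      · subst hdc
        have hcond : (!(t.reverse ++ [d]).isEmpty && (t.reverse ++ [d]).getLast? == some d) = true := by
          simp
        simp only [List.reverse_cons, hcond]
        have : (t.reverse ++ [d]).dropLast = t.reverse := by simp
        rw [this, ih t]
        simp [pvStep]
      · have hcond : (!(t.reverse ++ [d]).isEmpty && (t.reverse ++ [d]).getLast? == some c) = false := by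
          simp [hdc]
        simp only [List.reverse_cons, hcond, Bool.false_eq_true, if_false]
        have : t.reverse ++ [d] ++ [c] = (c :: d :: t).reverse := by simp
        rw [this, ih (c :: d :: t)]
        simp [pvStep, hdc]

-- ===== VERDICT (by name: the statement is the Claim_ definition above) =====
theorem solution_spec : Claim_equal_solution := by
  intro string _
  unfold Spec_solution solution solution_alt
  have h := solutionGo_eq string.toList []
  simp only [List.reverse_nil] at h
  rw [h, bSolve_eq]
  simp
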